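-- pv_equiv track=rewrite | github.com/anastasiasenyk/discrete_project_11 | isomorphism.py | vertices_check_not_directed
-- ===== SOURCE A (Python) =====
-- def vertices_check_not_directed(vertice_1: str, vertice_2: str, graph_1: dict, graph_2: dict) -> bool:
--     """
--     Check whether two vertices have same degree and
--     are connected with vertices which have same degrees.
--     Args:
--         vertice_1: name of first vertice
--         vertice_2: name of second vertice to check with
--         graph_1: dict of vertices of first graph
--         graph_2: dict of vertices of second graph
--     Returns:
--         bool: True if vertices and their adjacent vertices have the same degree,\
--               False if don't
--     """
--     if len(graph_1[vertice_1]) != len(graph_2[vertice_2]):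
--         return False
--     vertice_1_deg = {}
--     vertice_2_deg = {}
--     for vertice in graph_1[vertice_1]:
--         deg = len(graph_1[vertice])
--         if deg not in vertice_1_deg.keys():
--             vertice_1_deg[deg] = 1
--         else:
--             vertice_1_deg[deg] += 1
--     for vertice in graph_2[vertice_2]:
--         deg = len(graph_2[vertice])
--         if deg not in vertice_2_deg.keys():
--             vertice_2_deg[deg] = 1
--         else:
--             vertice_2_deg[deg] += 1
--     if vertice_1_deg == vertice_2_deg:
--         return True
--     else:
--         return False
-- ===== SOURCE B (Python) =====
-- def vertices_check_not_directed(vertice_1: str, vertice_2: str, graph_1: dict, graph_2: dict) -> bool: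
--     """Compare the neighbor-degree multisets as sorted lists instead of hash-count dicts."""
--     if len(graph_1[vertice_1]) != len(graph_2[vertice_2]):
--         return False
--     degs_1 = sorted(len(graph_1[v]) for v in graph_1[vertice_1])
--     degs_2 = sorted(len(graph_2[v]) for v in graph_2[vertice_2])
--     return degs_1 == degs_2
-- ===== Notes on version B (the rewrite author's own statement) =====
-- stated objective: idiomatic
-- what changed: B replaces A's two hand-maintained degree->count hash tables and dict comparison by building two sorted lists of neighbor degrees and comparing them for equality (sort-and-compare vs linear tally).
import Mathlib
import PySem

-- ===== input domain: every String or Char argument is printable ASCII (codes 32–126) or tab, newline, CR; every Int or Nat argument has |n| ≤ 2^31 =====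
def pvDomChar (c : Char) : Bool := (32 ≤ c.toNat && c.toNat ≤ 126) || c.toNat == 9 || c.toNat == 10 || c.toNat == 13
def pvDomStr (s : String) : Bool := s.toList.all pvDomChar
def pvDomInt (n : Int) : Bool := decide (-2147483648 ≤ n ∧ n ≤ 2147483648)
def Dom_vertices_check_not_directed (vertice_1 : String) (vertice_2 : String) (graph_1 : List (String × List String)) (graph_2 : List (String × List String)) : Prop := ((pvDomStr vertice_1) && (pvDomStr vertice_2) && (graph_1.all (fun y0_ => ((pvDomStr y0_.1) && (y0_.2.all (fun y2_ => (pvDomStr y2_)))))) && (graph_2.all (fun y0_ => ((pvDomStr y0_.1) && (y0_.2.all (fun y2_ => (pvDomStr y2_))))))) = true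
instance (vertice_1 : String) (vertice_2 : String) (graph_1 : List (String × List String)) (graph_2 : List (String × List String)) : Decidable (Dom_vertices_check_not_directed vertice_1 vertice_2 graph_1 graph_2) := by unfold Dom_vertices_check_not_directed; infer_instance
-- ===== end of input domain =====

-- B builds two sorted lists of neighbor degrees and compares them, instead of A's two
-- degree->count hash tables compared as Python dicts; return values agree on Pre_ (no mutation).

-- ===== PORT A =====
-- graph[v] (Python dict lookup, KeyError when absent -> none); Pre_ excludes the raising inputs
def pvAdj (g : List (String × List String)) (v : String) : Option (List String) :=
  (PySem.Dict.mk g).get? v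

-- len(graph[v]) as an Int; total via getD [], used only under Pre_ (key present)
def pvDeg (g : List (String × List String)) (v : String) : Int :=
  (((pvAdj g v).getD []).length : Int)

-- Python's dict == (order-insensitive): same key set and equal values at every key
def pvDictEq (d1 d2 : PySem.Dict Int Int) : Bool :=
  PySem.Set.equal d1.keys d2.keys && d1.keys.all (fun k => d1.get? k == d2.get? k)

def vertices_check_not_directed (vertice_1 : String) (vertice_2 : String) (graph_1 : List (String × List String)) (graph_2 : List (String × List String)) : Bool :=
  match pvAdj graph_1 vertice_1, pvAdj graph_2 vertice_2 with
  | some adj1, some adj2 =>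
    if (adj1.length : Int) ≠ (adj2.length : Int) then false
    else
      let vertice_1_deg : PySem.Dict Int Int :=
        adj1.foldl (fun d vertice =>
          let deg := pvDeg graph_1 vertice
          if d.contains deg = false then d.insert deg 1 else d.modify deg 0 (· + 1))
          PySem.Dict.empty
      let vertice_2_deg : PySem.Dict Int Int :=
        adj2.foldl (fun d vertice =>
          let deg := pvDeg graph_2 vertice
          if d.contains deg = false then d.insert deg 1 else d.modify deg 0 (· + 1))
          PySem.Dict.empty
      if pvDictEq vertice_1_deg vertice_2_deg then true else false
  | _, _ => false  -- KeyError in Python; outside Pre_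

-- ===== PORT B =====
def vertices_check_not_directed_alt (vertice_1 : String) (vertice_2 : String) (graph_1 : List (String × List String)) (graph_2 : List (String × List String)) : Bool :=
  match pvAdj graph_1 vertice_1 with
  | none => false  -- KeyError in Python; outside Pre_
  | some adj1 =>
    match pvAdj graph_2 vertice_2 with
    | none => false  -- KeyError in Python; outside Pre_
    | some adj2 =>
      if (adj1.length : Int) ≠ (adj2.length : Int) then false
      else
        let degs_1 := PySem.List.sorted (adj1.map (fun v => pvDeg graph_1 v)) (fun x => x) false
        let degs_2 := PySem.List.sorted (adj2.map (fun v => pvDeg graph_2 v)) (fun x => x) false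
        degs_1 == degs_2

-- ===== PRECONDITION & SPEC =====
-- Pre_ excludes exactly the inputs where the Python raises KeyError: a missing start vertex,
-- or (when the two adjacency lists have equal length, so the loops run) a neighbor missing
-- from its own graph. B raises in exactly the same places.
def Pre_vertices_check_not_directed (vertice_1 : String) (vertice_2 : String) (graph_1 : List (String × List String)) (graph_2 : List (String × List String)) : Prop :=
  (pvAdj graph_1 vertice_1).isSome = true ∧ (pvAdj graph_2 vertice_2).isSome = true ∧
  ((((pvAdj graph_1 vertice_1).getD []).length : Int) = (((pvAdj graph_2 vertice_2).getD []).length : Int) →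
    (∀ u ∈ (pvAdj graph_1 vertice_1).getD [], (pvAdj graph_1 u).isSome = true) ∧
    (∀ u ∈ (pvAdj graph_2 vertice_2).getD [], (pvAdj graph_2 u).isSome = true))
instance (vertice_1 : String) (vertice_2 : String) (graph_1 : List (String × List String)) (graph_2 : List (String × List String)) : Decidable (Pre_vertices_check_not_directed vertice_1 vertice_2 graph_1 graph_2) := by unfold Pre_vertices_check_not_directed; infer_instance

def pvWitness_vertices_check_not_directed : String × String × (List (String × List String)) × (List (String × List String)) :=
  ("a", "x", [("a", ["b", "b"]), ("b", ["a"])], [("x", ["y", "y"]), ("y", ["x"])])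

def Spec_vertices_check_not_directed (vertice_1 : String) (vertice_2 : String) (graph_1 : List (String × List String)) (graph_2 : List (String × List String)) (out : Bool) : Prop := out = vertices_check_not_directed_alt vertice_1 vertice_2 graph_1 graph_2
instance (vertice_1 : String) (vertice_2 : String) (graph_1 : List (String × List String)) (graph_2 : List (String × List String)) (out : Bool) : Decidable (Spec_vertices_check_not_directed vertice_1 vertice_2 graph_1 graph_2 out) := by unfold Spec_vertices_check_not_directed; infer_instance

-- ===== CLAIM (what is proved, stated in full; the proofs are below) =====
def Claim_equal_vertices_check_not_directed : Prop := ∀ (vertice_1 : String) (vertice_2 : String) (graph_1 : List (String × List String)) (graph_2 : List (String × List String)), Dom_vertices_check_not_directed vertice_1 vertice_2 graph_1 graph_2 → Pre_vertices_check_not_directed vertice_1 vertice_2 graph_1 graph_2 → Spec_vertices_check_not_directed vertice_1 vertice_2 graph_1 graph_2 (vertices_check_not_directed vertice_1 vertice_2 graph_1 graph_2)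

-- ===== LEMMAS AND PROOFS =====

-- A's per-element update is exactly the Counter step
theorem pv_step_eq_counter_step (d : PySem.Dict Int Int) (x : Int) :
    (if d.contains x = false then d.insert x 1 else d.modify x 0 (· + 1))
      = d.modify x 0 (· + 1) := by
  by_cases h : d.contains x = false
  · rw [if_pos h, PySem.Dict.modify, PySem.Dict.getD_of_not_contains _ _ h]; norm_num
  · simp [h]

theorem pv_fold_eq_counter (l : List Int) :
    (l.foldl (fun d x =>
        if d.contains x = false then d.insert x 1 else d.modify x 0 (· + 1))
        PySem.Dict.empty)
      = PySem.Dict.counter l := by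
  rw [PySem.Dict.counter_eq_foldl]
  exact PySem.List.foldl_congr_mem l _ _ _ (fun d x _ => pv_step_eq_counter_step d x)

theorem pv_get?_counter (l : List Int) (v : Int) :
    (PySem.Dict.counter l).get? v = if v ∈ l then some ((l.count v : Int)) else none := by
  have hc : (PySem.Dict.counter l).contains v = l.contains v := PySem.Dict.contains_counter l v
  rw [PySem.Dict.contains_eq_isSome_get?] at hc
  by_cases h : v ∈ l
  · have hs : ((PySem.Dict.counter l).get? v).isSome = true := by
      rw [hc]; simpa using h
    obtain ⟨w, hw⟩ := Option.isSome_iff_exists.mp hs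
    have hg := PySem.Dict.getD_counter l v
    rw [PySem.Dict.getD_eq_get?_getD, hw] at hg
    simp only [Option.getD_some] at hg
    simp [h, hw, hg]
  · have hs : ((PySem.Dict.counter l).get? v).isSome = false := by
      rw [hc]; simpa using h
    have hn : (PySem.Dict.counter l).get? v = none := by
      cases hg : (PySem.Dict.counter l).get? v
      · rfl
      · rw [hg] at hs; simp at hs
    simp [h, hn]

-- Python dict equality of the two counters says exactly: equal multisets
theorem pv_dictEq_counter_iff (l1 l2 : List Int) :
    pvDictEq (PySem.Dict.counter l1) (PySem.Dict.counter l2) = true ↔ l1.Perm l2 := by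
  unfold pvDictEq
  rw [Bool.and_eq_true, PySem.Set.equal_iff, List.all_eq_true, List.perm_iff_count]
  simp only [PySem.Dict.keys_counter, PySem.Set.mem_ofList, pv_get?_counter, beq_iff_eq]
  constructor
  · rintro ⟨hk, hv⟩ v
    by_cases h1 : v ∈ l1
    · have hvv := hv v (by simpa using h1)
      rw [if_pos h1, if_pos ((hk v).mp h1)] at hvv
      exact_mod_cast (Option.some_inj.mp hvv)
    · have h2 : v ∉ l2 := fun h => h1 ((hk v).mpr h)
      simp [List.count_eq_zero_of_not_mem h1, List.count_eq_zero_of_not_mem h2]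
  · intro h
    have hmem : ∀ v, v ∈ l1 ↔ v ∈ l2 := by
      intro v
      rw [← List.count_pos_iff, ← List.count_pos_iff, h v]
    refine ⟨hmem, fun v hv => ?_⟩
    have h1 : v ∈ l1 := by simpa using hv
    rw [if_pos h1, if_pos ((hmem v).mp h1), h v]

theorem vertices_check_eq (vertice_1 vertice_2 : String) (graph_1 graph_2 : List (String × List String))
    (hpre : Pre_vertices_check_not_directed vertice_1 vertice_2 graph_1 graph_2) :
    vertices_check_not_directed vertice_1 vertice_2 graph_1 graph_2
      = vertices_check_not_directed_alt vertice_1 vertice_2 graph_1 graph_2 := by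
  obtain ⟨h1, h2, _⟩ := hpre
  obtain ⟨adj1, ha1⟩ := Option.isSome_iff_exists.mp h1
  obtain ⟨adj2, ha2⟩ := Option.isSome_iff_exists.mp h2
  unfold vertices_check_not_directed vertices_check_not_directed_alt
  rw [ha1, ha2]
  by_cases hlen : (adj1.length : Int) ≠ (adj2.length : Int)
  · simp [hlen]
  · simp only [hlen, if_false]
    have e1 : adj1.foldl (fun d vertice =>
          let deg := pvDeg graph_1 vertice
          if d.contains deg = false then d.insert deg 1 else d.modify deg 0 (· + 1))
          PySem.Dict.empty
        = PySem.Dict.counter (adj1.map (fun v => pvDeg graph_1 v)) := by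
      rw [← pv_fold_eq_counter, List.foldl_map]
    have e2 : adj2.foldl (fun d vertice =>
          let deg := pvDeg graph_2 vertice
          if d.contains deg = false then d.insert deg 1 else d.modify deg 0 (· + 1))
          PySem.Dict.empty
        = PySem.Dict.counter (adj2.map (fun v => pvDeg graph_2 v)) := by
      rw [← pv_fold_eq_counter, List.foldl_map]
    simp only [e1, e2]
    by_cases hp : (adj1.map (fun v => pvDeg graph_1 v)).Perm (adj2.map (fun v => pvDeg graph_2 v))
    · rw [if_pos ((pv_dictEq_counter_iff _ _).mpr hp)]
      exact ((beq_iff_eq).mpr ((PySem.List.sorted_id_eq_sorted_id_iff_perm _ _).mpr hp)).symm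
    · rw [if_neg (fun h => hp ((pv_dictEq_counter_iff _ _).mp h))]
      have hne : ¬ (PySem.List.sorted (adj1.map (fun v => pvDeg graph_1 v)) (fun x => x) false
          = PySem.List.sorted (adj2.map (fun v => pvDeg graph_2 v)) (fun x => x) false) :=
        fun h => hp ((PySem.List.sorted_id_eq_sorted_id_iff_perm _ _).mp h)
      exact (beq_eq_false_iff_ne.mpr hne).symm

-- ===== VERDICT (by name: the statement is the Claim_ definition above) =====
theorem vertices_check_not_directed_spec : Claim_equal_vertices_check_not_directed := by
  intro v1 v2 g1 g2 _ hpre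
  unfold Spec_vertices_check_not_directed
  exact vertices_check_eq v1 v2 g1 g2 hpre
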